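-- pv_equiv track=rewrite | github.com/mertmetin1/CodeStepByStepAnswers | last_names_by_age.py | last_names_by_age
-- ===== SOURCE A (Python) =====
-- def last_names_by_age(dic, min_age, max_age):
--     dic0 = {}
--     keys = list(dic.keys())
--     last_names = []
--     ages = []
--
--     for i in range(len(keys)):
--         last_name = keys[i].split()
--         last_names.append(last_name[len(last_name) - 1])
--         ages.append(dic.get(keys[i]))
--
--     for i in range(len(ages)):
--         s = ""
--         if min_age <= ages[i] <= max_age:
--             for j in range(len(keys)):
--                 if dic.get(keys[j]) == ages[i]:
--                     s += last_names[j] + " and "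
--             s = s.removesuffix(" and ")
--             dic0.update({ages[i]: s})
--     return dic0
-- ===== SOURCE B (Python) =====
-- def last_names_by_age(dic, min_age, max_age):
--     groups = {}
--     for name, age in dic.items():
--         groups.setdefault(age, []).append(name.split()[-1])
--     return {age: " and ".join(names)
--             for age, names in groups.items()
--             if min_age <= age <= max_age}
-- ===== Notes on version B (the rewrite author's own statement) =====
-- stated objective: simpler
-- what changed: Replaces A's per-age rescan of all keys (string '+= name and ' plus removesuffix, over parallel index lists) with a single grouping pass over the dict and one ' and '.join per in-range age.
import Mathlib
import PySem

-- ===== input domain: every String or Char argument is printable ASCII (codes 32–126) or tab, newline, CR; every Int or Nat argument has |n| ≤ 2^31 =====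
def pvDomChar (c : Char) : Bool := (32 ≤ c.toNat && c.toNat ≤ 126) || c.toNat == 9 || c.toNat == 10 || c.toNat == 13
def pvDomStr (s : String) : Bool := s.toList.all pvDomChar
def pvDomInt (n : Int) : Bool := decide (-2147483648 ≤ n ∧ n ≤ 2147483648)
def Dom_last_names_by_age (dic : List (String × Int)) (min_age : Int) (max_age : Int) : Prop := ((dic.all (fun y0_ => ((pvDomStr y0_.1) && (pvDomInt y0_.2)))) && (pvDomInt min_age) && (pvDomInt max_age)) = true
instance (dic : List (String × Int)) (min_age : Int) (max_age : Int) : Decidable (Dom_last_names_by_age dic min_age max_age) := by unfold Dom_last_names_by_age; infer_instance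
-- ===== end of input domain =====

-- B replaces A's per-age rescan of all keys (with '+= " and "' and removesuffix) by one
-- grouping pass over the dict and one ' and '.join per in-range age (objective: simpler).

-- ===== PORT A =====
-- s.removesuffix(suf): exact hand port (PySem has no removesuffix) — drop suf once if it is a suffix
def pvRemovesuffix (s suf : List Char) : List Char :=
  if PySem.Chars.endswith s suf then s.take (s.length - suf.length) else s

def last_names_by_age (dic : List (String × Int)) (min_age : Int) (max_age : Int) : List (Int × String) :=
  let d : PySem.Dict String Int := PySem.Dict.ofList dic
  let keys := d.keys
  let ln_ages :=
    (PySem.List.pyRange 0 (PySem.List.len keys)).foldl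
      (fun (acc : List String × List Int) i =>
        let last_name := PySem.Str.split₀ (PySem.List.pyGetD keys i "")
        -- last_name[len(last_name)-1]: IndexError when split() is empty — excluded by Pre_
        (acc.1 ++ [PySem.List.pyGetD last_name ((last_name.length : Int) - 1) ""],
         -- dic.get(keys[i]): keys[i] is a key of dic, so the lookup always succeeds (default unreachable)
         acc.2 ++ [d.getD (PySem.List.pyGetD keys i "") 0]))
      ([], [])
  let last_names := ln_ages.1
  let ages := ln_ages.2
  let dic0 :=
    (PySem.List.pyRange 0 (PySem.List.len ages)).foldl
      (fun (dic0 : PySem.Dict Int String) i =>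
        let a := PySem.List.pyGetD ages i 0
        if min_age ≤ a ∧ a ≤ max_age then
          let s := (PySem.List.pyRange 0 (PySem.List.len keys)).foldl
            (fun (s : List Char) j =>
              -- dic.get(keys[j]) == ages[i]: both lookups succeed, so int comparison is exact
              if d.getD (PySem.List.pyGetD keys j "") 0 = a then
                s ++ (PySem.List.pyGetD last_names j "").toList ++ " and ".toList
              else s) []
          dic0.insert a (String.ofList (pvRemovesuffix s " and ".toList))
        else dic0)
      PySem.Dict.empty
  dic0.items

-- ===== PORT B =====
def last_names_by_age_alt (dic : List (String × Int)) (min_age : Int) (max_age : Int) : List (Int × String) :=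
  let d : PySem.Dict String Int := PySem.Dict.ofList dic
  -- groups.setdefault(age, []).append(name.split()[-1])  ==  modify age [] (· ++ [name.split()[-1]])
  let groups : PySem.Dict Int (List String) :=
    d.items.foldl
      (fun g p =>
        g.modify p.2 [] (fun ns => ns ++ [PySem.List.pyGetD (PySem.Str.split₀ p.1) (-1) ""]))
      PySem.Dict.empty
  -- the dict comprehension over groups.items with the range filter
  (groups.items.foldl
      (fun (r : PySem.Dict Int String) q =>
        if min_age ≤ q.1 ∧ q.1 ≤ max_age then r.insert q.1 (PySem.Str.join " and " q.2) else r)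
      PySem.Dict.empty).items

-- ===== PRECONDITION & SPEC =====
-- Pre_ excludes exactly the inputs where some key is empty or whitespace-only: there
-- 'key.split()[-1]' raises IndexError in A (and in B alike).
def Pre_last_names_by_age (dic : List (String × Int)) (min_age : Int) (max_age : Int) : Prop :=
  ∀ p ∈ dic, PySem.Str.split₀ p.1 ≠ []
instance (dic : List (String × Int)) (min_age : Int) (max_age : Int) : Decidable (Pre_last_names_by_age dic min_age max_age) := by unfold Pre_last_names_by_age; infer_instance
def pvWitness_last_names_by_age : (List (String × Int)) × Int × Int :=
  ([("Ann Smith", 30), ("Bo Jones", 41)], 25, 45)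

def Spec_last_names_by_age (dic : List (String × Int)) (min_age : Int) (max_age : Int) (out : List (Int × String)) : Prop := out = last_names_by_age_alt dic min_age max_age
instance (dic : List (String × Int)) (min_age : Int) (max_age : Int) (out : List (Int × String)) : Decidable (Spec_last_names_by_age dic min_age max_age out) := by unfold Spec_last_names_by_age; infer_instance

-- ===== CLAIM (what is proved, stated in full; the proofs are below) =====
def Claim_equal_last_names_by_age : Prop := ∀ (dic : List (String × Int)) (min_age : Int) (max_age : Int), Dom_last_names_by_age dic min_age max_age → Pre_last_names_by_age dic min_age max_age → Spec_last_names_by_age dic min_age max_age (last_names_by_age dic min_age max_age)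

-- ===== LEMMAS AND PROOFS =====

-- the last word of a key, as both programs compute it (xs[-1] form)
def pvLastW (k : String) : String := PySem.List.pyGetD (PySem.Str.split₀ k) (-1) ""
-- the last names of the entries with age a, in insertion order
def pvNames (items : List (String × Int)) (a : Int) : List String :=
  (items.filter (fun p => p.2 == a)).map (fun p => pvLastW p.1)

-- xs[len(xs)-1] and xs[-1] are the same Python index
theorem pv_last_idx (ls : List String) (v : String) :
    PySem.List.pyGetD ls ((ls.length : Int) - 1) v = PySem.List.pyGetD ls (-1) v := by
  rcases ls.eq_nil_or_concat with rfl | ⟨ys, y, rfl⟩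
  · rfl
  · simp only [List.concat_eq_append]
    rw [PySem.List.pyGetD_neg_one_append_singleton]
    have h1 : ((ys ++ [y]).length : Int) - 1 = (ys.length : Nat) := by simp
    rw [h1, PySem.List.pyGetD_natCast]
    simp

-- indexing the mapped last-name list is mapping the indexed key
theorem pv_get_lastW (keys : List String) (j : Int) :
    PySem.List.pyGetD (keys.map pvLastW) j "" = pvLastW (PySem.List.pyGetD keys j "") := by
  have h := PySem.List.pyGetD_map pvLastW keys j ""
  rw [show pvLastW "" = "" from by decide] at h
  exact h

-- an 'if p x: s += g1 x + g2 x' loop collects the filtered flatMap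
theorem pv_foldl_append_if_flat {α β : Type} (P : α → Prop) [DecidablePred P]
    (g1 g2 : α → List β) (l : List α) (acc : List β) :
    l.foldl (fun s x => if P x then s ++ g1 x ++ g2 x else s) acc
      = acc ++ (l.filter (fun x => decide (P x))).flatMap (fun x => g1 x ++ g2 x) := by
  induction l generalizing acc with
  | nil => simp
  | cons x l ih =>
    rw [List.foldl_cons]
    by_cases h : P x
    · rw [if_pos h, ih]; simp [h]
    · rw [if_neg h, ih]; simp [h]

-- removesuffix of the '+= n + sep'-concatenation is sep.join
theorem pv_removesuffix_join (nss : List (List Char)) (sep : List Char) (h : sep ≠ []) :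
    pvRemovesuffix (nss.flatMap (fun n => n ++ sep)) sep = PySem.Chars.join sep nss := by
  unfold pvRemovesuffix
  cases nss with
  | nil =>
    have he : PySem.Chars.endswith [] sep = false := by
      rw [Bool.eq_false_iff]
      intro hc
      exact h (List.suffix_nil.mp ((PySem.Chars.endswith_iff _ _).mp hc))
    simp [he, PySem.Chars.join_nil]
  | cons n rest =>
    have key : ∀ (rest : List (List Char)) (n : List Char),
        (n :: rest).flatMap (fun m => m ++ sep) = PySem.Chars.join sep (n :: rest) ++ sep := by
      intro rest
      induction rest with
      | nil => intro n; simp [PySem.Chars.join_singleton]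
      | cons m r ih =>
        intro n
        rw [PySem.Chars.join_cons_cons]
        simp only [List.flatMap_cons] at ih ⊢
        rw [ih m]
        simp
    rw [key]
    have he : PySem.Chars.endswith (PySem.Chars.join sep (n :: rest) ++ sep) sep = true :=
      (PySem.Chars.endswith_iff _ _).mpr (List.suffix_append _ _)
    simp [he]

-- inserting (a, v a) for the in-range a of l builds the dict in first-occurrence order
theorem pv_fold_insert (rng : Int → Prop) [DecidablePred rng] (v : Int → String)
    (l : List Int) (dd : PySem.Dict Int String) (s : PySem.Set Int)
    (hit : dd.items = (s.filter (fun a => decide (rng a))).map (fun a => (a, v a))) :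
    (l.foldl (fun dd a => if rng a then dd.insert a (v a) else dd) dd).items
      = ((PySem.Set.update s l).filter (fun a => decide (rng a))).map (fun a => (a, v a)) := by
  induction l generalizing dd s with
  | nil => simpa [PySem.Set.update] using hit
  | cons a t ih =>
    have hupd : PySem.Set.update s (a :: t) = PySem.Set.update (PySem.Set.add s a) t := rfl
    rw [List.foldl_cons, hupd]
    have hkeys : dd.keys = s.filter (fun a => decide (rng a)) := by
      have h0 : dd.keys = dd.items.map (·.1) := rfl
      rw [h0, hit, List.map_map]
      exact List.map_id'' (congrFun rfl) _
    by_cases hr : rng a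
    · by_cases hm : a ∈ s
      · have hadd : PySem.Set.add s a = s := by
          simp [PySem.Set.add, hm]
        have hc : dd.contains a = true := by
          rw [PySem.Dict.contains_iff_mem_keys, hkeys]
          simp [hm, hr]
        have hit' : (dd.insert a (v a)).items = (s.filter (fun a => decide (rng a))).map (fun a => (a, v a)) := by
          rw [PySem.Dict.items_insert_of_contains _ _ hc, hit, List.map_map]
          apply List.map_congr_left
          intro b _
          by_cases hb : b = a
          · subst hb; simp
          · simp [hb]
        rw [if_pos hr, hadd]
        exact ih _ _ hit'
      · have hadd : PySem.Set.add s a = s ++ [a] := by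
          simp [PySem.Set.add, hm]
        have hc : dd.contains a = false := by
          rw [Bool.eq_false_iff]
          intro hc
          rw [PySem.Dict.contains_iff_mem_keys, hkeys] at hc
          exact hm (List.mem_of_mem_filter hc)
        have hit' : (dd.insert a (v a)).items
            = ((s ++ [a]).filter (fun a => decide (rng a))).map (fun a => (a, v a)) := by
          rw [PySem.Dict.items_insert, hc, hit]
          simp [hr]
        rw [if_pos hr, hadd]
        exact ih _ _ hit'
    · have hadd : (PySem.Set.add s a).filter (fun a => decide (rng a)) = s.filter (fun a => decide (rng a)) := by
        by_cases hm : a ∈ s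
        · simp [PySem.Set.add, hm]
        · simp [PySem.Set.add, hm, hr]
      rw [if_neg hr]
      exact ih _ _ (by rw [hit, hadd])

-- B computes: group, then filter the distinct ages and join
theorem pvB_core (items : List (String × Int)) (min_age max_age : Int) :
    (List.foldl
      (fun (r : PySem.Dict Int String) q =>
        if min_age ≤ q.1 ∧ q.1 ≤ max_age then r.insert q.1 (PySem.Str.join " and " q.2) else r)
      PySem.Dict.empty
      (PySem.Dict.items (List.foldl
        (fun g p => PySem.Dict.modify g p.2 [] (fun ns => ns ++ [PySem.List.pyGetD (PySem.Str.split₀ p.1) (-1) ""]))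
        (PySem.Dict.empty : PySem.Dict Int (List String)) items))).items
      = ((PySem.Set.ofList (items.map (·.2))).filter
          (fun a => decide (min_age ≤ a ∧ a ≤ max_age))).map
          (fun a => (a, PySem.Str.join " and " (pvNames items a))) := by
  have hgfold :
      items.foldl (fun g p => g.modify p.2 [] (fun ns => ns ++ [PySem.List.pyGetD (PySem.Str.split₀ p.1) (-1) ""])) PySem.Dict.empty
        = (items.map (fun p => (p.2, pvLastW p.1))).foldl (fun g q => g.modify q.1 [] (fun ns => ns ++ [q.2])) (PySem.Dict.empty : PySem.Dict Int (List String)) := by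
    rw [List.foldl_map]
    rfl
  rw [hgfold]
  have hkeys : ((items.map (fun p => (p.2, pvLastW p.1))).foldl (fun g q => g.modify q.1 [] (fun ns => ns ++ [q.2])) (PySem.Dict.empty : PySem.Dict Int (List String))).keys
      = PySem.Set.ofList (items.map (·.2)) := by
    rw [PySem.Dict.keys_foldl_modify_key (items.map (fun p => (p.2, pvLastW p.1))) (fun (q : Int × String) => q.1) ([] : List String) (fun _ q => (fun ns => ns ++ [q.2]))]
    simp only [PySem.Dict.keys_empty, List.map_map]
    rfl
  have hnd : ((items.map (fun p => (p.2, pvLastW p.1))).foldl (fun g q => g.modify q.1 [] (fun ns => ns ++ [q.2])) (PySem.Dict.empty : PySem.Dict Int (List String))).keys.Nodup := by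
    rw [hkeys]; exact PySem.Set.nodup_ofList _
  have hgetD : ∀ a, ((items.map (fun p => (p.2, pvLastW p.1))).foldl (fun g q => g.modify q.1 [] (fun ns => ns ++ [q.2])) (PySem.Dict.empty : PySem.Dict Int (List String))).getD a []
      = pvNames items a := by
    intro a
    rw [PySem.Dict.getD_foldl_modify_append]
    simp [pvNames, List.filter_map, Function.comp_def, List.map_map]
  have hgitems : ((items.map (fun p => (p.2, pvLastW p.1))).foldl (fun g q => g.modify q.1 [] (fun ns => ns ++ [q.2])) (PySem.Dict.empty : PySem.Dict Int (List String))).items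
      = (PySem.Set.ofList (items.map (·.2))).map (fun a => (a, pvNames items a)) := by
    rw [PySem.Dict.items_eq_map_keys _ hnd [], hkeys]
    exact List.map_congr_left (fun a _ => by rw [hgetD a])
  rw [hgitems]
  rw [List.foldl_map]
  have := pv_fold_insert (fun a => min_age ≤ a ∧ a ≤ max_age) (fun a => PySem.Str.join " and " (pvNames items a))
      (PySem.Set.ofList (items.map (·.2))) PySem.Dict.empty [] (by rfl)
  simp only at this ⊢
  rw [this]
  rw [show PySem.Set.update ([] : PySem.Set Int) (PySem.Set.ofList (items.map (·.2))) = PySem.Set.ofList (items.map (·.2)) from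
    by simpa using PySem.Set.update_eq_append_of_disjoint [] _ (PySem.Set.nodup_ofList _) (by simp)]

-- A computes the same list
theorem pvA_core (d : PySem.Dict String Int) (hnd : d.keys.Nodup) (min_age max_age : Int) :
    (List.foldl
      (fun (dic0 : PySem.Dict Int String) i =>
        let a := PySem.List.pyGetD
          ((PySem.List.pyRange 0 (PySem.List.len d.keys)).foldl
            (fun (acc : List String × List Int) i =>
              let last_name := PySem.Str.split₀ (PySem.List.pyGetD d.keys i "")
              (acc.1 ++ [PySem.List.pyGetD last_name ((last_name.length : Int) - 1) ""],
               acc.2 ++ [d.getD (PySem.List.pyGetD d.keys i "") 0]))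
            ([], [])).2 i 0
        if min_age ≤ a ∧ a ≤ max_age then
          let s := (PySem.List.pyRange 0 (PySem.List.len d.keys)).foldl
            (fun (s : List Char) j =>
              if d.getD (PySem.List.pyGetD d.keys j "") 0 = a then
                s ++ (PySem.List.pyGetD
                  ((PySem.List.pyRange 0 (PySem.List.len d.keys)).foldl
                    (fun (acc : List String × List Int) i =>
                      let last_name := PySem.Str.split₀ (PySem.List.pyGetD d.keys i "")
                      (acc.1 ++ [PySem.List.pyGetD last_name ((last_name.length : Int) - 1) ""],
                       acc.2 ++ [d.getD (PySem.List.pyGetD d.keys i "") 0]))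
                    ([], [])).1 j "").toList ++ " and ".toList
              else s) []
          dic0.insert a (String.ofList (pvRemovesuffix s " and ".toList))
        else dic0)
      PySem.Dict.empty
      (PySem.List.pyRange 0 (PySem.List.len
        ((PySem.List.pyRange 0 (PySem.List.len d.keys)).foldl
          (fun (acc : List String × List Int) i =>
            let last_name := PySem.Str.split₀ (PySem.List.pyGetD d.keys i "")
            (acc.1 ++ [PySem.List.pyGetD last_name ((last_name.length : Int) - 1) ""],
             acc.2 ++ [d.getD (PySem.List.pyGetD d.keys i "") 0]))
          ([], [])).2))).items
    = ((PySem.Set.ofList (d.items.map (·.2))).filter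
        (fun a => decide (min_age ≤ a ∧ a ≤ max_age))).map
        (fun a => (a, PySem.Str.join " and " (pvNames d.items a))) := by
  -- the first loop produces (keys.map <last word>, keys.map <age>)
  have hpair :
      (PySem.List.pyRange 0 (PySem.List.len d.keys)).foldl
        (fun (acc : List String × List Int) i =>
          let last_name := PySem.Str.split₀ (PySem.List.pyGetD d.keys i "")
          (acc.1 ++ [PySem.List.pyGetD last_name ((last_name.length : Int) - 1) ""],
           acc.2 ++ [d.getD (PySem.List.pyGetD d.keys i "") 0]))
        ([], [])
      = (d.keys.map pvLastW, d.keys.map (fun k => d.getD k 0)) := by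
    rw [PySem.List.foldl_pyRange_zero_pyGetD d.keys ""
      (fun (acc : List String × List Int) k =>
        (acc.1 ++ [PySem.List.pyGetD (PySem.Str.split₀ k) (((PySem.Str.split₀ k).length : Int) - 1) ""],
         acc.2 ++ [d.getD k 0])) ([], [])]
    rw [PySem.List.foldl_prod_mk
      (fun (s1 : List String) k => s1 ++ [PySem.List.pyGetD (PySem.Str.split₀ k) (((PySem.Str.split₀ k).length : Int) - 1) ""])
      (fun (s2 : List Int) k => s2 ++ [d.getD k 0]) d.keys [] []]
    rw [PySem.List.foldl_append_singleton_eq_map, PySem.List.foldl_append_singleton_eq_map]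
    simp only [List.nil_append]
    congr 1
    exact List.map_congr_left (fun k _ => pv_last_idx _ _)
  rw [hpair]
  simp only []
  rw [PySem.List.foldl_pyRange_zero_pyGetD (d.keys.map (fun k => d.getD k 0)) 0
    (fun (dic0 : PySem.Dict Int String) a =>
      if min_age ≤ a ∧ a ≤ max_age then
        dic0.insert a (String.ofList (pvRemovesuffix
          ((PySem.List.pyRange 0 (PySem.List.len d.keys)).foldl
            (fun (s : List Char) j =>
              if d.getD (PySem.List.pyGetD d.keys j "") 0 = a then
                s ++ (PySem.List.pyGetD (d.keys.map pvLastW) j "").toList ++ " and ".toList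
              else s) [])
          " and ".toList))
      else dic0) PySem.Dict.empty]
  -- the inner string loop computes ' and '.join of the matching last names
  have hstr : ∀ a : Int,
      String.ofList (pvRemovesuffix
        ((PySem.List.pyRange 0 (PySem.List.len d.keys)).foldl
          (fun (s : List Char) j =>
            if d.getD (PySem.List.pyGetD d.keys j "") 0 = a then
              s ++ (PySem.List.pyGetD (d.keys.map pvLastW) j "").toList ++ " and ".toList
            else s) [])
        " and ".toList)
      = PySem.Str.join " and " (pvNames d.items a) := by
    intro a
    simp only [pv_get_lastW]
    rw [PySem.List.foldl_pyRange_zero_pyGetD d.keys ""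
      (fun (s : List Char) k =>
        if d.getD k 0 = a then s ++ (pvLastW k).toList ++ " and ".toList else s) []]
    rw [pv_foldl_append_if_flat (fun k => d.getD k 0 = a)
      (fun k => (pvLastW k).toList) (fun _ => " and ".toList) d.keys []]
    have hkeys1 : d.keys = d.items.map (·.1) := rfl
    have hfilt : d.keys.filter (fun k => decide (d.getD k 0 = a))
        = (d.items.filter (fun p => p.2 == a)).map (·.1) := by
      rw [hkeys1, List.filter_map]
      congr 1
      apply List.filter_congr
      intro p hp
      have : d.getD p.1 0 = p.2 :=
        PySem.Dict.getD_of_mem_items d (by simpa using hp) hnd 0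
      simp only [Function.comp, this]
      rw [Bool.eq_iff_iff]
      simp
    rw [hfilt, List.nil_append, List.flatMap_map]
    have hflat : ((d.items.filter (fun p => p.2 == a)).flatMap
          (fun p => (pvLastW p.1).toList ++ " and ".toList))
        = ((pvNames d.items a).map String.toList).flatMap (fun n => n ++ " and ".toList) := by
      simp [pvNames, List.flatMap_map, Function.comp_def, List.map_map]
    rw [hflat, pv_removesuffix_join _ _ (by decide)]
    rw [show PySem.Chars.join " and ".toList ((pvNames d.items a).map String.toList)
        = (PySem.Str.join " and " (pvNames d.items a)).toList from
      (PySem.Str.toList_join _ _).symm]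
    exact String.ofList_toList
  rw [pv_fold_insert (fun a => min_age ≤ a ∧ a ≤ max_age)
    (fun a => String.ofList (pvRemovesuffix
      ((PySem.List.pyRange 0 (PySem.List.len d.keys)).foldl
        (fun (s : List Char) j =>
          if d.getD (PySem.List.pyGetD d.keys j "") 0 = a then
            s ++ (PySem.List.pyGetD (d.keys.map pvLastW) j "").toList ++ " and ".toList
          else s) [])
      " and ".toList))
    (d.keys.map (fun k => d.getD k 0)) PySem.Dict.empty [] rfl]
  have hages : d.keys.map (fun k => d.getD k 0) = d.items.map (·.2) := by
    conv_rhs => rw [PySem.Dict.items_eq_map_keys d hnd 0]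
    rw [List.map_map]
    rfl
  rw [hages]
  rw [show PySem.Set.update ([] : PySem.Set Int) (d.items.map (·.2))
      = PySem.Set.ofList (d.items.map (·.2)) from rfl]
  exact List.map_congr_left (fun a _ => by rw [hstr a])
-- ===== VERDICT (by name: the statement is the Claim_ definition above) =====
theorem last_names_by_age_spec : Claim_equal_last_names_by_age := by
  intro dic min_age max_age _hdom _hpre
  unfold Spec_last_names_by_age
  have hA := pvA_core (PySem.Dict.ofList dic) (PySem.Dict.nodup_keys_ofList dic) min_age max_age
  have hB := pvB_core (PySem.Dict.ofList dic).items min_age max_age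
  exact hA.trans hB.symm
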